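-- pv_equiv track=rewrite | github.com/kellemNegasi/fed-perso-xai | src/fed_perso_xai/evaluation/comparison.py | _collect_metric_names
-- ===== SOURCE A (Python) =====
-- from typing import Any
--
-- DEFAULT_COMPARISON_ORDER = (
--     "centralized_global_eval",
--     "centralized_pooled_client_test",
--     "federated_client_test_weighted",
--     "federated_client_test_pooled",
-- )
--
-- def _collect_metric_names(split_sections: dict[str, dict[str, Any] | None]) -> list[str]:
--     ordered: list[str] = []
--     seen: set[str] = set()
--     for section_name in DEFAULT_COMPARISON_ORDER:
--         section = split_sections.get(section_name)
--         if section is None: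
--             continue
--         for metric_name in section["metrics"]:
--             if metric_name not in seen:
--                 seen.add(metric_name)
--                 ordered.append(metric_name)
--     return ordered
-- ===== SOURCE B (Python) =====
-- DEFAULT_COMPARISON_ORDER = (
--     "centralized_global_eval",
--     "centralized_pooled_client_test",
--     "federated_client_test_weighted",
--     "federated_client_test_pooled",
-- )
--
-- def _collect_metric_names(split_sections):
--     # Collect every metric name in section order, then deduplicate by a
--     # recursive "keep the head, remove its later duplicates" scheme: the
--     # first occurrence of each name survives, all later copies are filtered
--     # away before recursing on the remainder.
--     flat = []
--     for section_name in DEFAULT_COMPARISON_ORDER: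
--         section = split_sections.get(section_name)
--         if section is not None:
--             flat += list(section["metrics"])
--
--     def walk(names):
--         if not names:
--             return []
--         head = names[0]
--         return [head] + walk([n for n in names[1:] if n != head])
--
--     return walk(flat)
-- ===== Notes on version B (the rewrite author's own statement) =====
-- stated objective: alternative
-- what changed: A single interleaved pass with a seen-set is replaced by collect-then-dedup, where deduplication is done by head-recursion that filters all later duplicates of the head out of the tail before recursing (no seen set at all).
import Mathlib
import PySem

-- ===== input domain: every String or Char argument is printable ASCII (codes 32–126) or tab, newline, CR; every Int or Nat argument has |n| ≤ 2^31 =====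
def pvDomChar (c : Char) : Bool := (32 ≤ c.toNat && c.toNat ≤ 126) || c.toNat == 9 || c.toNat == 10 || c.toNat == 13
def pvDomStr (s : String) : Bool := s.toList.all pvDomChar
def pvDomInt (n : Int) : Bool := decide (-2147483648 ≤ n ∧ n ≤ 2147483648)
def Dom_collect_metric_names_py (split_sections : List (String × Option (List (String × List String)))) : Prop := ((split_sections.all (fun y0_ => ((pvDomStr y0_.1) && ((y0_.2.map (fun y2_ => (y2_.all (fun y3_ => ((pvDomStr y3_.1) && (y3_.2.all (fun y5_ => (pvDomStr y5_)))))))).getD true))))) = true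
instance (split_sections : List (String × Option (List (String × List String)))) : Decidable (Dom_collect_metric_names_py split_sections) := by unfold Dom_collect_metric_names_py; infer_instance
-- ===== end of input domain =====

-- B replaces A's interleaved seen-set loop by collect-then-dedup, where dedup is a
-- head-recursion that filters later duplicates of the head out of the tail; alternative, not faster.

-- ===== PORT A =====
def pvOrder : List String :=
  ["centralized_global_eval", "centralized_pooled_client_test",
   "federated_client_test_weighted", "federated_client_test_pooled"]

-- split_sections.get(name): None if the key is absent or its value is None
def pvSectionGet (split_sections : List (String × Option (List (String × List String))))
    (name : String) : Option (List (String × List String)) :=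
  ((PySem.Dict.mk split_sections).get? name).join

-- sec["metrics"]; the KeyError case (key absent) is excluded by Pre_, the default is never used there
def pvMetrics (sec : List (String × List String)) : List String :=
  ((PySem.Dict.mk sec).get? "metrics").getD []

def collect_metric_names_py (split_sections : List (String × Option (List (String × List String)))) : List String :=
  (pvOrder.foldl
    (fun (st : List String × PySem.Set String) section_name =>
      match pvSectionGet split_sections section_name with
      | none => st
      | some sec =>
        (pvMetrics sec).foldl
          (fun st metric_name =>
            if PySem.Set.contains st.2 metric_name then st
            else (st.1 ++ [metric_name], PySem.Set.add st.2 metric_name))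
          st)
    ([], PySem.Set.empty)).1

-- ===== PORT B =====
-- walk(names): keep the head, drop its later duplicates from the tail, recurse
def pvWalk : List String → List String
  | [] => []
  | head :: rest => head :: pvWalk (rest.filter (fun n => n ≠ head))
termination_by l => l.length
decreasing_by
  refine Nat.lt_succ_of_le ?_
  rw [List.length_unattach]
  exact le_trans (List.length_filter_le _ _) (le_of_eq List.length_attach)

def collect_metric_names_py_alt (split_sections : List (String × Option (List (String × List String)))) : List String :=
  let flat := pvOrder.foldl
    (fun flat section_name =>
      match pvSectionGet split_sections section_name with
      | none => flat
      | some sec => flat ++ pvMetrics sec)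
    []
  pvWalk flat

-- ===== PRECONDITION & SPEC =====
-- Pre_ excludes exactly the inputs where a listed section is present and non-None but has no
-- "metrics" key: there the Python A raises KeyError (and B raises the same KeyError).
def Pre_collect_metric_names_py (split_sections : List (String × Option (List (String × List String)))) : Prop :=
  (pvOrder.all (fun name =>
    match pvSectionGet split_sections name with
    | none => true
    | some sec => (PySem.Dict.mk sec).contains "metrics")) = true

instance (split_sections : List (String × Option (List (String × List String)))) : Decidable (Pre_collect_metric_names_py split_sections) := by unfold Pre_collect_metric_names_py; infer_instance

def pvWitness_collect_metric_names_py : (List (String × Option (List (String × List String)))) :=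
  [("centralized_global_eval", some [("metrics", ["acc", "loss"])]),
   ("federated_client_test_pooled", none)]

def Spec_collect_metric_names_py (split_sections : List (String × Option (List (String × List String)))) (out : List String) : Prop := out = collect_metric_names_py_alt split_sections
instance (split_sections : List (String × Option (List (String × List String)))) (out : List String) : Decidable (Spec_collect_metric_names_py split_sections out) := by unfold Spec_collect_metric_names_py; infer_instance

-- ===== CLAIM (what is proved, stated in full; the proofs are below) =====
def Claim_equal_collect_metric_names_py : Prop := ∀ (split_sections : List (String × Option (List (String × List String)))), Dom_collect_metric_names_py split_sections → Pre_collect_metric_names_py split_sections → Spec_collect_metric_names_py split_sections (collect_metric_names_py split_sections)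

-- ===== LEMMAS AND PROOFS =====

-- A's inner dedup step, starting from a state whose seen set IS its ordered list,
-- keeps the two components equal and acts as a PySem.Set.update.
theorem pv_fold_seen (ms : List String) (l : PySem.Set String) :
    ms.foldl
      (fun (st : List String × PySem.Set String) m =>
        if PySem.Set.contains st.2 m then st else (st.1 ++ [m], PySem.Set.add st.2 m))
      (l, l)
    = (PySem.Set.update l ms, PySem.Set.update l ms) := by
  induction ms generalizing l with
  | nil => simp [PySem.Set.update]
  | cons m ms ih =>
    rw [List.foldl_cons, PySem.Set.update_cons]
    by_cases h : m ∈ l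
    · simpa [h, PySem.Set.add_of_mem h] using ih l
    · simpa [h, PySem.Set.add_of_not_mem h] using ih (l ++ [m])

-- A's outer loop over sections equals one fold over the concatenation of their metric lists.
theorem pv_outer_flat (ss : List (String × Option (List (String × List String))))
    (order : List String) (st : List String × PySem.Set String) :
    order.foldl
      (fun (st : List String × PySem.Set String) section_name =>
        match pvSectionGet ss section_name with
        | none => st
        | some sec =>
          (pvMetrics sec).foldl
            (fun st metric_name =>
              if PySem.Set.contains st.2 metric_name then st
              else (st.1 ++ [metric_name], PySem.Set.add st.2 metric_name))
            st)
      st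
    = (order.flatMap (fun n => match pvSectionGet ss n with
        | none => [] | some sec => pvMetrics sec)).foldl
        (fun (st : List String × PySem.Set String) metric_name =>
          if PySem.Set.contains st.2 metric_name then st
          else (st.1 ++ [metric_name], PySem.Set.add st.2 metric_name))
        st := by
  induction order generalizing st with
  | nil => rfl
  | cons n rest ih =>
    rw [List.foldl_cons, List.flatMap_cons, List.foldl_append]
    cases h : pvSectionGet ss n with
    | none => exact ih st
    | some sec => exact ih _

-- B's collecting loop equals the same concatenation.
theorem pv_alt_flat (ss : List (String × Option (List (String × List String))))
    (order : List String) (acc : List String) :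
    order.foldl
      (fun acc section_name =>
        match pvSectionGet ss section_name with
        | none => acc
        | some sec => acc ++ pvMetrics sec)
      acc
    = acc ++ order.flatMap (fun n => match pvSectionGet ss n with
        | none => [] | some sec => pvMetrics sec) := by
  induction order generalizing acc with
  | nil => simp
  | cons n rest ih =>
    rw [List.foldl_cons, List.flatMap_cons]
    cases h : pvSectionGet ss n with
    | none => rw [ih]; simp
    | some sec => rw [ih]; simp

-- The recursive "drop later duplicates of the head" dedup equals the seen-set dedup:
-- Set.update l xs is l followed by pvWalk of those xs not already in l.
theorem pv_update_eq_walk (xs : List String) (l : List String) :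
    PySem.Set.update l xs = l ++ pvWalk (xs.filter (fun x => decide (x ∉ l))) := by
  induction xs generalizing l with
  | nil => rw [pvWalk.eq_def]; simp [PySem.Set.update]
  | cons x t ih =>
    rw [PySem.Set.update_cons, List.filter_cons]
    by_cases h : x ∈ l
    · simpa [h, PySem.Set.add_of_mem h] using ih l
    · rw [PySem.Set.add_of_not_mem h]
      simp only [h, not_false_eq_true, decide_true, if_pos]
      rw [ih (l ++ [x])]
      conv_rhs => rw [pvWalk.eq_def]
      simp
      congr 1
      exact List.filter_congr (fun a _ => by rw [Bool.and_comm])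

-- ===== VERDICT (by name: the statement is the Claim_ definition above) =====
theorem collect_metric_names_py_spec : Claim_equal_collect_metric_names_py := by
  intro ss _ _
  unfold Spec_collect_metric_names_py collect_metric_names_py collect_metric_names_py_alt
  rw [pv_outer_flat, pv_alt_flat]
  have h0 : (PySem.Set.empty : PySem.Set String) = ([] : List String) := rfl
  rw [h0, pv_fold_seen]
  simp [pv_update_eq_walk]
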